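-- pv_equiv track=rewrite | github.com/Gul4ik793/phyton | functions11092025.py | Summ_N
-- ===== SOURCE A (Python) =====
-- def Summ_N(N, M):
--     f = str()
--     h = 0
--     for i in range(N):
--         i += 1
--         f = f + str(M)
--         h = h + int(f)
--     return(h)
-- ===== SOURCE B (Python) =====
-- def Summ_N(N, M):
--     # closed form: sum_{i=1..N} int(str(M)*i) = M * sum_{i=1..N} (B^i-1)/(B-1), B = 10**len(str(M))
--     if N <= 0:
--         return 0
--     base = 10 ** len(str(M))
--     geo = (base ** (N + 1) - base) // (base - 1)  # sum of base**i for i = 1..N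
--     return M * ((geo - N) // (base - 1))
-- ===== Notes on version B (the rewrite author's own statement) =====
-- stated objective: faster
-- what changed: A rebuilds the concatenated string and re-parses it with int() on every iteration (O(N^2) digit work); B evaluates the same sum in closed form as M * ((B^(N+1)-B)//(B-1) - N)//(B-1) with B = 10**len(str(M)), a few bigint power/divisions.
import Mathlib
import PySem

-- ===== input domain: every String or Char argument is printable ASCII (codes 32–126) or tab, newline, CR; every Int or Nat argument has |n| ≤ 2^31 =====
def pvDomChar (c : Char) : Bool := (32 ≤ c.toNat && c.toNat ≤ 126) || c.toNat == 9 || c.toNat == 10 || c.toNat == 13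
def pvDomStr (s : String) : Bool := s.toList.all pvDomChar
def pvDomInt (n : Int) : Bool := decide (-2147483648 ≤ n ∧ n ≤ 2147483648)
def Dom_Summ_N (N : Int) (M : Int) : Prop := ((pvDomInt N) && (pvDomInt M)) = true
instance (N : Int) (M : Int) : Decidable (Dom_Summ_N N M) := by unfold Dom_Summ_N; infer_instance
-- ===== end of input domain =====

-- B replaces A's quadratic rebuild-and-reparse loop by the closed-form geometric sum
-- M * Σ_{i=1..N} (B^i-1)/(B-1) with B = 10^len(str(M)); exact same return values on Pre_.

-- ===== PORT A =====
def Summ_N (N : Int) (M : Int) : Int :=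
  (((PySem.List.pyRange 0 N 1).foldl
      (fun (st : List Char × Option Int) _i =>
        let f := st.1 ++ PySem.Int.toChars M
        (f, match st.2, PySem.Int.ofChars? f with
            | some h, some v => some (h + v)
            | _, _ => none))
      (([] : List Char), some (0 : Int))).2).getD 0

-- ===== PORT B =====
def Summ_N_alt (N : Int) (M : Int) : Int :=
  if N ≤ 0 then 0
  else
    let base : Int := 10 ^ (PySem.Int.toChars M).length
    let geo : Int := PySem.Int.floordiv (base ^ (N + 1).toNat - base) (base - 1)
    M * PySem.Int.floordiv (geo - N) (base - 1)

-- ===== PRECONDITION & SPEC =====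
-- Pre_ excludes exactly the inputs where A raises ValueError: for M < 0 and N ≥ 2 the
-- second loop iteration calls int("...-..." ) on a string with an interior '-' sign.
def Pre_Summ_N (N : Int) (M : Int) : Prop := 0 ≤ M ∨ N ≤ 1
instance (N : Int) (M : Int) : Decidable (Pre_Summ_N N M) := by unfold Pre_Summ_N; infer_instance
def pvWitness_Summ_N : Int × Int := (3, 7)
def Spec_Summ_N (N : Int) (M : Int) (out : Int) : Prop := out = Summ_N_alt N M
instance (N : Int) (M : Int) (out : Int) : Decidable (Spec_Summ_N N M out) := by unfold Spec_Summ_N; infer_instance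

-- ===== CLAIM (what is proved, stated in full; the proofs are below) =====
def Claim_equal_Summ_N : Prop := ∀ (N : Int) (M : Int), Dom_Summ_N N M → Pre_Summ_N N M → Spec_Summ_N N M (Summ_N N M)

-- ===== LEMMAS AND PROOFS =====

/- A verbatim clone of the private parser behind `PySem.Int.ofChars?`; `bridge` below proves
   (by paired weak-head reduction) that `ofChars?` agrees with it, so all parsing facts can be
   established on the clone. -/
def myGo : List Char → Bool → Nat → Option Nat
  | [], afterDigit, acc => if afterDigit = true then some acc else none
  | c :: rest, afterDigit, acc =>
      if c.isDigit = true then myGo rest true (acc * 10 + (c.toNat - '0'.toNat))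
      else if c = '_' ∧ afterDigit = true then
        match rest with
        | d :: _ => if d.isDigit = true then myGo rest false acc else none
        | [] => none
      else none

def myDigitsVal? : List Char → Option Nat
  | [] => none
  | cs => myGo cs false 0

def myOfChars? : List Char → Option Int := fun s =>
  have cs := (List.dropWhile PySem.Int.isIntSpace (List.dropWhile PySem.Int.isIntSpace s).reverse).reverse
  match cs with
  | '-' :: ds => Option.map (fun n => -n) (do let a ← myDigitsVal? ds; pure ((a : Nat) : Int))
  | '+' :: ds => Option.map (fun n => n) (do let a ← myDigitsVal? ds; pure ((a : Nat) : Int))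
  | ds => Option.map (fun n => n) (do let a ← myDigitsVal? ds; pure ((a : Nat) : Int))

theorem bridge : ∀ cs : List Char, PySem.Int.ofChars? cs = myOfChars? cs := by
  intro cs
  conv_lhs => whnf
  conv_rhs => whnf
  generalize (List.dropWhile PySem.Int.isIntSpace (List.dropWhile PySem.Int.isIntSpace cs).reverse).reverse = ds
  cases ds with
  | nil => rfl
  | cons c ds' =>
    by_cases hm : c = '-'
    · subst hm
      conv_lhs => whnf
      conv_rhs => whnf
      congr 1
      congr 1
      apply congrFun
      funext xs
      cases xs with
      | nil => rfl
      | cons c2 rest =>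
        conv_lhs => whnf
        conv_rhs => whnf
        cases hc2 : c2.isDigit with
        | false =>
          conv_lhs => whnf
          conv_rhs => whnf
          cases hI : (instDecidableAnd : Decidable (c2 = '_' ∧ false = true)) with
          | isTrue h => exact absurd h.2 (by simp)
          | isFalse h => rfl
        | true =>
          conv_lhs => whnf
          conv_rhs => whnf
          apply congrFun
          apply congrFun
          apply congrFun
          funext ys b acc
          induction ys generalizing b acc with
          | nil => rfl
          | cons d tail ih =>
            conv_lhs => whnf
            conv_rhs => whnf
            cases hd : d.isDigit with
            | true =>
              conv_lhs => whnf
              conv_rhs => whnf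
              exact ih _ _
            | false =>
              conv_lhs => whnf
              conv_rhs => whnf
              cases hI2 : (instDecidableAnd : Decidable (d = '_' ∧ b = true)) with
              | isFalse h => rfl
              | isTrue h =>
                cases tail with
                | nil => rfl
                | cons e t2 =>
                  conv_lhs => whnf
                  conv_rhs => whnf
                  cases he : e.isDigit with
                  | true => exact ih _ _
                  | false => rfl
    · by_cases hp : c = '+'
      · subst hp
        conv_lhs => whnf
        conv_rhs => whnf
        congr 1
        congr 1
        apply congrFun
        funext xs
        cases xs with
        | nil => rfl
        | cons c2 rest =>
          conv_lhs => whnf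
          conv_rhs => whnf
          cases hc2 : c2.isDigit with
          | false =>
            conv_lhs => whnf
            conv_rhs => whnf
            cases hI : (instDecidableAnd : Decidable (c2 = '_' ∧ false = true)) with
            | isTrue h => exact absurd h.2 (by simp)
            | isFalse h => rfl
          | true =>
            conv_lhs => whnf
            conv_rhs => whnf
            apply congrFun
            apply congrFun
            apply congrFun
            funext ys b acc
            induction ys generalizing b acc with
            | nil => rfl
            | cons d tail ih =>
              conv_lhs => whnf
              conv_rhs => whnf
              cases hd : d.isDigit with
              | true =>
                conv_lhs => whnf
                conv_rhs => whnf
                exact ih _ _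
              | false =>
                conv_lhs => whnf
                conv_rhs => whnf
                cases hI2 : (instDecidableAnd : Decidable (d = '_' ∧ b = true)) with
                | isFalse h => rfl
                | isTrue h =>
                  cases tail with
                  | nil => rfl
                  | cons e t2 =>
                    conv_lhs => whnf
                    conv_rhs => whnf
                    cases he : e.isDigit with
                    | true => exact ih _ _
                    | false => rfl
      · conv_lhs => whnf
        conv_rhs => whnf
        split
        · simp_all
        · simp_all
        · split
          · simp_all
          · simp_all
          · congr 1
            congr 1
            apply congrFun
            funext xs
            cases xs with
            | nil => rfl
            | cons c2 rest =>
              conv_lhs => whnf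
              conv_rhs => whnf
              cases hc2 : c2.isDigit with
              | false =>
                conv_lhs => whnf
                conv_rhs => whnf
                cases hI : (instDecidableAnd : Decidable (c2 = '_' ∧ false = true)) with
                | isTrue h => exact absurd h.2 (by simp)
                | isFalse h => rfl
              | true =>
                conv_lhs => whnf
                conv_rhs => whnf
                apply congrFun
                apply congrFun
                apply congrFun
                funext ys b acc
                induction ys generalizing b acc with
                | nil => rfl
                | cons d tail ih =>
                  conv_lhs => whnf
                  conv_rhs => whnf
                  cases hd : d.isDigit with
                  | true =>
                    conv_lhs => whnf
                    conv_rhs => whnf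
                    exact ih _ _
                  | false =>
                    conv_lhs => whnf
                    conv_rhs => whnf
                    cases hI2 : (instDecidableAnd : Decidable (d = '_' ∧ b = true)) with
                    | isFalse h => rfl
                    | isTrue h =>
                      cases tail with
                      | nil => rfl
                      | cons e t2 =>
                        conv_lhs => whnf
                        conv_rhs => whnf
                        cases he : e.isDigit with
                        | true => exact ih _ _
                        | false => rfl

/-- the digit-accumulator step of Python's base-10 parse -/
def digStep (a : Nat) (c : Char) : Nat := a * 10 + (c.toNat - '0'.toNat)

theorem isIntSpace_of_isDigit {c : Char} (h : c.isDigit = true) :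
    PySem.Int.isIntSpace c = false := by
  simp only [Char.isDigit, ge_iff_le, Bool.and_eq_true, decide_eq_true_eq] at h
  simp only [PySem.Int.isIntSpace, Bool.or_eq_false_iff, decide_eq_false_iff_not]
  refine ⟨⟨⟨⟨⟨?_, ?_⟩, ?_⟩, ?_⟩, ?_⟩, ?_⟩ <;>
    (intro he; subst he; revert h; decide)

theorem dropWhile_eq_self_of_all {p : Char → Bool} {l : List Char}
    (h : ∀ c ∈ l, p c = false) : l.dropWhile p = l := by
  cases l with
  | nil => rfl
  | cons c cs => simp [h c (by simp)]

theorem myGo_digits (ds : List Char) (h : ∀ c ∈ ds, c.isDigit = true) :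
    ∀ acc, myGo ds true acc = some (ds.foldl digStep acc) := by
  induction ds with
  | nil => intro acc; simp [myGo]
  | cons c rest ih =>
    intro acc
    simp only [myGo, h c (by simp), if_true, List.foldl_cons]
    exact ih (fun d hd => h d (by simp [hd])) _

theorem myGo_digits' (ds : List Char) (hne : ds ≠ []) (h : ∀ c ∈ ds, c.isDigit = true)
    (b : Bool) (acc : Nat) : myGo ds b acc = some (ds.foldl digStep acc) := by
  cases ds with
  | nil => exact absurd rfl hne
  | cons c rest =>
    simp only [myGo, h c (by simp), if_true, List.foldl_cons]
    exact myGo_digits rest (fun d hd => h d (by simp [hd])) _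

theorem myDigitsVal?_digits (ds : List Char) (hne : ds ≠ []) (h : ∀ c ∈ ds, c.isDigit = true) :
    myDigitsVal? ds = some (ds.foldl digStep 0) := by
  cases ds with
  | nil => exact absurd rfl hne
  | cons c rest => exact myGo_digits' (c :: rest) (by simp) h false 0

theorem strip_eq_self {l : List Char} (h : ∀ c ∈ l, PySem.Int.isIntSpace c = false) :
    (List.dropWhile PySem.Int.isIntSpace (List.dropWhile PySem.Int.isIntSpace l).reverse).reverse = l := by
  rw [dropWhile_eq_self_of_all h, dropWhile_eq_self_of_all (by simpa using h), List.reverse_reverse]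

theorem parse_digits (ds : List Char) (hne : ds ≠ []) (h : ∀ c ∈ ds, c.isDigit = true) :
    PySem.Int.ofChars? ds = some ((ds.foldl digStep 0 : Nat) : Int) := by
  rw [bridge]
  show (have cs := _; _) = _
  rw [myOfChars?]
  rw [strip_eq_self (fun c hc => isIntSpace_of_isDigit (h c hc))]
  cases ds with
  | nil => exact absurd rfl hne
  | cons c rest =>
    have hcd : c.isDigit = true := h c (by simp)
    have hm : c ≠ '-' := by intro he; subst he; revert hcd; decide
    have hp : c ≠ '+' := by intro he; subst he; revert hcd; decide
    split
    · next ds2 heq => injection heq with h1 h2; exact absurd h1 hm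
    · next ds2 heq => injection heq with h1 h2; exact absurd h1 hp
    · rw [myDigitsVal?_digits (c :: rest) (by simp) h]; rfl

theorem parse_neg_digits (ds : List Char) (hne : ds ≠ []) (h : ∀ c ∈ ds, c.isDigit = true) :
    PySem.Int.ofChars? ('-' :: ds) = some (-((ds.foldl digStep 0 : Nat) : Int)) := by
  rw [bridge, myOfChars?]
  have hall : ∀ c ∈ ('-' :: ds), PySem.Int.isIntSpace c = false := by
    intro c hc
    rcases List.mem_cons.1 hc with rfl | hc
    · decide
    · exact isIntSpace_of_isDigit (h c hc)
  rw [strip_eq_self hall]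
  split
  · next ds2 heq =>
    injection heq with h1 h2
    subst h2
    rw [myDigitsVal?_digits ds hne h]
    rfl
  · next ds2 heq => injection heq with h1 h2; simp at h1
  · next hno1 hno2 => exact absurd rfl (hno1 ds)

/-- decimal digits of a natural number, least-significant last (clone of `Nat.toDigitsCore`'s output) -/
def myDigits (n : Nat) : List Char :=
  if h : n / 10 = 0 then [Nat.digitChar (n % 10)]
  else myDigits (n / 10) ++ [Nat.digitChar (n % 10)]
  termination_by n
  decreasing_by exact Nat.div_lt_self (by omega) (by omega)

theorem toDigitsCore_eq : ∀ (f n : Nat) (l : List Char), n < f →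
    Nat.toDigitsCore 10 f n l = myDigits n ++ l := by
  intro f
  induction f with
  | zero => intro n l h; omega
  | succ f ih =>
    intro n l h
    simp only [Nat.toDigitsCore]
    by_cases h0 : n / 10 = 0
    · rw [if_pos h0, myDigits, dif_pos h0]
      rfl
    · rw [if_neg h0, ih (n / 10) _ (by omega)]
      have hm : myDigits n = myDigits (n / 10) ++ [Nat.digitChar (n % 10)] := by
        rw [myDigits, dif_neg h0]
      rw [hm]
      simp

theorem toDigits_eq (n : Nat) : Nat.toDigits 10 n = myDigits n := by
  rw [Nat.toDigits, toDigitsCore_eq (n + 1) n [] (by omega), List.append_nil]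

theorem digitChar_isDigit {k : Nat} (h : k < 10) : (Nat.digitChar k).isDigit = true := by
  interval_cases k <;> decide

theorem digitChar_val {k : Nat} (h : k < 10) : (Nat.digitChar k).toNat - '0'.toNat = k := by
  interval_cases k <;> decide

theorem myDigits_all_digit (n : Nat) : ∀ c ∈ myDigits n, c.isDigit = true := by
  induction n using Nat.strong_induction_on with
  | _ n ih =>
    rw [myDigits]
    by_cases h0 : n / 10 = 0
    · rw [dif_pos h0]
      intro c hc
      simp only [List.mem_singleton] at hc
      subst hc
      exact digitChar_isDigit (by omega)
    · rw [dif_neg h0]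
      intro c hc
      rcases List.mem_append.1 hc with hc | hc
      · exact ih (n / 10) (Nat.div_lt_self (by omega) (by omega)) c hc
      · simp only [List.mem_singleton] at hc
        subst hc
        exact digitChar_isDigit (by omega)

theorem myDigits_ne_nil (n : Nat) : myDigits n ≠ [] := by
  rw [myDigits]
  by_cases h0 : n / 10 = 0
  · rw [dif_pos h0]; simp
  · rw [dif_neg h0]; simp

theorem myDigits_foldl (n : Nat) : ∀ acc : Nat,
    (myDigits n).foldl digStep acc = acc * 10 ^ (myDigits n).length + n := by
  induction n using Nat.strong_induction_on with
  | _ n ih =>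
    intro acc
    rw [myDigits]
    by_cases h0 : n / 10 = 0
    · rw [dif_pos h0]
      simp only [List.foldl_cons, List.foldl_nil, List.length_singleton, pow_one, digStep]
      rw [digitChar_val (by omega)]
      omega
    · rw [dif_neg h0]
      rw [List.foldl_append, List.length_append, List.foldl_cons, List.foldl_nil,
        ih (n / 10) (Nat.div_lt_self (by omega) (by omega)) acc]
      simp only [digStep, List.length_singleton, pow_succ]
      rw [digitChar_val (by omega)]
      have : 10 * (n / 10) + n % 10 = n := by omega
      ring_nf
      omega

theorem toChars_of_nonneg {M : Int} (h : 0 ≤ M) :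
    PySem.Int.toChars M = myDigits M.toNat := by
  rw [PySem.Int.toChars, if_neg (by omega), toDigits_eq]

theorem toChars_of_neg {M : Int} (h : M < 0) :
    PySem.Int.toChars M = '-' :: myDigits M.natAbs := by
  rw [PySem.Int.toChars, if_pos h, toDigits_eq]

theorem toChars_ne_nil (M : Int) : PySem.Int.toChars M ≠ [] := by
  by_cases h : M < 0
  · rw [toChars_of_neg h]; simp
  · rw [toChars_of_nonneg (by omega)]; exact myDigits_ne_nil _

theorem roundtrip (M : Int) : PySem.Int.ofChars? (PySem.Int.toChars M) = some M := by
  by_cases h : M < 0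
  · rw [toChars_of_neg h,
      parse_neg_digits _ (myDigits_ne_nil _) (myDigits_all_digit _),
      myDigits_foldl M.natAbs 0]
    simp only [zero_mul, zero_add]
    congr 1
    omega
  · rw [toChars_of_nonneg (by omega),
      parse_digits _ (myDigits_ne_nil _) (myDigits_all_digit _),
      myDigits_foldl M.toNat 0]
    simp only [zero_mul, zero_add]
    congr 1
    omega

-- ===== the A-side loop, characterised =====

/-- the concatenation A builds: k copies of `str(M)` -/
def repChars (M : Int) : Nat → List Char
  | 0 => []
  | k + 1 => repChars M k ++ PySem.Int.toChars M

/-- integer value of k copies of `str(M)` (for `0 ≤ M`): v₀ = 0, v_{k+1} = v_k·B + M -/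
def repVal (b M : Int) : Nat → Int
  | 0 => 0
  | k + 1 => repVal b M k * b + M

/-- partial sums A accumulates: h_k = Σ_{j=1..k} v_j -/
def hSum (b M : Int) : Nat → Int
  | 0 => 0
  | k + 1 => hSum b M k + repVal b M (k + 1)

theorem repChars_all_digit {M : Int} (h : 0 ≤ M) (k : Nat) :
    ∀ c ∈ repChars M k, c.isDigit = true := by
  induction k with
  | zero => simp [repChars]
  | succ k ih =>
    intro c hc
    rcases List.mem_append.1 hc with hc | hc
    · exact ih c hc
    · rw [toChars_of_nonneg h] at hc
      exact myDigits_all_digit _ c hc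

theorem repChars_ne_nil {M : Int} (k : Nat) : repChars M (k + 1) ≠ [] := by
  simp [repChars, toChars_ne_nil M]

theorem len_toChars_nonneg {M : Int} (h : 0 ≤ M) :
    (PySem.Int.toChars M).length = (myDigits M.toNat).length := by
  rw [toChars_of_nonneg h]

theorem repChars_foldl {M : Int} (h : 0 ≤ M) (k : Nat) :
    (((repChars M (k + 1)).foldl digStep 0 : Nat) : Int)
      = repVal ((10 : Int) ^ (PySem.Int.toChars M).length) M (k + 1) := by
  have hM : ((M.toNat : Nat) : Int) = M := by omega
  induction k with
  | zero =>
    show ((List.foldl digStep 0 ([] ++ PySem.Int.toChars M) : Nat) : Int) = _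
    rw [List.nil_append, toChars_of_nonneg h, myDigits_foldl M.toNat 0]
    simp only [zero_mul, zero_add, repVal]
    omega
  | succ k ih =>
    show ((List.foldl digStep 0 (repChars M (k + 1) ++ PySem.Int.toChars M) : Nat) : Int) = _
    rw [List.foldl_append, toChars_of_nonneg h,
      myDigits_foldl M.toNat (List.foldl digStep 0 (repChars M (k + 1)))]
    push_cast
    rw [← len_toChars_nonneg h, ih, hM]
    rw [show repVal ((10 : Int) ^ (PySem.Int.toChars M).length) M (k + 1 + 1)
        = repVal ((10 : Int) ^ (PySem.Int.toChars M).length) M (k + 1)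
            * (10 : Int) ^ (PySem.Int.toChars M).length + M from rfl]

/-- invariant of A's loop (for 0 ≤ M) -/
theorem loopA_inv {M : Int} (h : 0 ≤ M) (k : Nat) :
    ((PySem.List.pyRange 0 (k : Int) 1).foldl
      (fun (st : List Char × Option Int) _i =>
        let f := st.1 ++ PySem.Int.toChars M
        (f, match st.2, PySem.Int.ofChars? f with
            | some h, some v => some (h + v)
            | _, _ => none))
      (([] : List Char), some (0 : Int)))
    = (repChars M k, some (hSum ((10 : Int) ^ (PySem.Int.toChars M).length) M k)) := by
  induction k with
  | zero =>
    rw [PySem.List.pyRange_one_eq_nil (by omega)]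
    rfl
  | succ k ih =>
    have : ((k : Int) + 1) = ((k + 1 : Nat) : Int) := by push_cast; ring
    rw [← this, PySem.List.pyRange_one_succ_right (by omega), List.foldl_append, ih]
    simp only [List.foldl_cons, List.foldl_nil]
    have hparse : PySem.Int.ofChars? (repChars M k ++ PySem.Int.toChars M)
        = some (repVal ((10 : Int) ^ (PySem.Int.toChars M).length) M (k + 1)) := by
      rw [show repChars M k ++ PySem.Int.toChars M = repChars M (k + 1) from rfl]
      rw [parse_digits _ (repChars_ne_nil k) (repChars_all_digit h (k + 1))]
      rw [repChars_foldl h k]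
    rw [hparse]
    rfl

-- ===== geometric-sum arithmetic =====

/-- r_k = 1 + b + … + b^{k-1} -/
def rGeo (b : Int) : Nat → Int
  | 0 => 0
  | k + 1 => rGeo b k * b + 1

/-- S_k = b + b² + … + b^k -/
def sGeo (b : Int) : Nat → Int
  | 0 => 0
  | k + 1 => sGeo b k + b ^ (k + 1)

/-- T_k = r_1 + … + r_k -/
def tGeo (b : Int) : Nat → Int
  | 0 => 0
  | k + 1 => tGeo b k + rGeo b (k + 1)

theorem repVal_eq_mul_rGeo (b M : Int) (k : Nat) : repVal b M k = M * rGeo b k := by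
  induction k with
  | zero => simp [repVal, rGeo]
  | succ k ih => rw [repVal, rGeo, ih]; ring

theorem hSum_eq_mul_tGeo (b M : Int) (k : Nat) : hSum b M k = M * tGeo b k := by
  induction k with
  | zero => simp [hSum, tGeo]
  | succ k ih => rw [hSum, tGeo, ih, repVal_eq_mul_rGeo]; ring

theorem rGeo_mul (b : Int) (k : Nat) : (b - 1) * rGeo b k = b ^ k - 1 := by
  induction k with
  | zero => simp [rGeo]
  | succ k ih =>
    rw [rGeo, pow_succ]
    linear_combination b * ih

theorem sGeo_mul (b : Int) (k : Nat) : (b - 1) * sGeo b k = b ^ (k + 1) - b := by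
  induction k with
  | zero => simp [sGeo]
  | succ k ih =>
    rw [sGeo, pow_succ]
    linear_combination ih

theorem tGeo_mul (b : Int) (k : Nat) : (b - 1) * tGeo b k = sGeo b k - k := by
  induction k with
  | zero => simp [tGeo, sGeo]
  | succ k ih =>
    rw [tGeo, sGeo]
    have h1 := rGeo_mul b (k + 1)
    push_cast
    linear_combination ih + h1

theorem fdiv_mul_cancel {b : Int} (hb : 0 < b) (x : Int) :
    PySem.Int.floordiv (b * x) b = x := by
  rw [PySem.Int.floordiv_eq_ediv_of_pos hb]
  exact Int.mul_ediv_cancel_left x (by omega)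

theorem base_ge_ten (M : Int) : (10 : Int) ≤ 10 ^ (PySem.Int.toChars M).length := by
  have h1 : 1 ≤ (PySem.Int.toChars M).length := by
    rcases hne : PySem.Int.toChars M with _ | ⟨c, rest⟩
    · exact absurd hne (toChars_ne_nil M)
    · simp
  calc (10 : Int) = 10 ^ 1 := (pow_one 10).symm
    _ ≤ 10 ^ (PySem.Int.toChars M).length := by
        exact pow_le_pow_right₀ (by norm_num) h1

-- ===== VERDICT helper: the main equivalence =====

theorem main_equiv (N M : Int) (hpre : Pre_Summ_N N M) : Summ_N N M = Summ_N_alt N M := by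
  by_cases hN : N ≤ 0
  · rw [Summ_N, Summ_N_alt, if_pos hN, PySem.List.pyRange_one_eq_nil (by omega)]
    rfl
  · -- N ≥ 1
    set L := (PySem.Int.toChars M).length with hL
    set b : Int := 10 ^ L with hbdef
    have hb : (10 : Int) ≤ b := base_ge_ten M
    obtain ⟨k, hk⟩ : ∃ k : Nat, N = (k : Int) + 1 :=
      ⟨(N - 1).toNat, by omega⟩
    rcases hpre with hM | hN1
    · -- 0 ≤ M : the general case
      subst hk
      have hcast : ((k : Int) + 1) = ((k + 1 : Nat) : Int) := by push_cast; ring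
      rw [Summ_N, hcast, loopA_inv hM (k + 1)]
      rw [Summ_N_alt, if_neg (by omega)]
      show hSum b M (k + 1) = M * PySem.Int.floordiv
        (PySem.Int.floordiv (b ^ (((k + 1 : Nat) : Int) + 1).toNat - b) (b - 1) - ((k + 1 : Nat) : Int)) (b - 1)
      have htn : ((((k + 1 : Nat) : Int)) + 1).toNat = k + 2 := by omega
      rw [htn]
      have hgeo : b ^ (k + 2) - b = (b - 1) * sGeo b (k + 1) := by
        rw [sGeo_mul b (k + 1)]
      rw [hgeo, fdiv_mul_cancel (by omega)]
      have hT : sGeo b (k + 1) - ((k + 1 : Nat) : Int) = (b - 1) * tGeo b (k + 1) := by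
        rw [tGeo_mul b (k + 1)]
      rw [hT, fdiv_mul_cancel (by omega)]
      exact hSum_eq_mul_tGeo b M (k + 1)
    · -- M < 0 forced to N = 1
      have hN1' : N = 1 := by omega
      subst hN1'
      rw [Summ_N, PySem.List.pyRange_one_cons (by omega), PySem.List.pyRange_one_eq_nil (by omega)]
      simp only [List.nil_append, List.foldl_cons, List.foldl_nil, List.nil_append]
      rw [roundtrip M]
      rw [Summ_N_alt, if_neg (by omega)]
      show (0 + M : Int) = M * PySem.Int.floordiv
        (PySem.Int.floordiv (b ^ ((1 : Int) + 1).toNat - b) (b - 1) - 1) (b - 1)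
      have h2 : b ^ ((1 : Int) + 1).toNat = b ^ 2 := rfl
      rw [h2]
      have : b ^ 2 - b = (b - 1) * b := by ring
      rw [this, fdiv_mul_cancel (by omega)]
      have h4 : PySem.Int.floordiv (b - 1) (b - 1) = 1 := by
        have h5 := fdiv_mul_cancel (show (0 : Int) < b - 1 by omega) 1
        rwa [mul_one] at h5
      rw [h4]
      ring

-- ===== VERDICT (by name: the statement is the Claim_ definition above) =====
theorem Summ_N_spec : Claim_equal_Summ_N := by
  intro N M _hdom hpre
  unfold Spec_Summ_N
  exact main_equiv N M hpre
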